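-- pv_equiv track=rewrite | github.com/kzhang31415/15316-lab-2 | part1/extract_secrets.py | parse_server_output
-- ===== SOURCE A (Python) =====
-- from typing import Callable, Optional
--
-- def parse_server_output(stdout: str, stderr: str) -> tuple[str, Optional[int]]:
--     lines: list[str] = []
--     if stdout.strip():
--         lines.extend(x.strip() for x in stdout.strip().splitlines() if x.strip())
--     if stderr.strip():
--         lines.extend(x.strip() for x in stderr.strip().splitlines() if x.strip())
--
--     for line in reversed(lines):
--         if line.startswith("success "):
--             try:
--                 return "success", int(line.split()[1])
--             except Exception:
--                 return "success", None
--         if line.startswith("failure "):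
--             try:
--                 return "failure", int(line.split()[1])
--             except Exception:
--                 return "failure", None
--         if line in {"error", "abort", "insecure"}:
--             return line, None
--     if not lines:
--         return "no-output", None
--     return "unknown", None
-- ===== SOURCE B (Python) =====
-- from typing import Optional
--
-- STATUS_WORDS = ("error", "abort", "insecure")
--
--
-- def _clean_lines(text: str) -> list[str]:
--     return [x.strip() for x in text.strip().splitlines() if x.strip()]
--
--
-- def _classify(line: str) -> Optional[tuple[str, Optional[int]]]:
--     if line.startswith(("success ", "failure ")):
--         try:
--             code: Optional[int] = int(line.split()[1])
--         except Exception: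
--             code = None
--         return line[:7], code
--     if line in STATUS_WORDS:
--         return line, None
--     return None
--
--
-- def _scan(text: str) -> tuple[bool, Optional[tuple[str, Optional[int]]]]:
--     """Parse one stream independently: (had any non-empty line, last recognized status)."""
--     lines = _clean_lines(text)
--     hits = [h for h in map(_classify, lines) if h is not None]
--     return bool(lines), hits[-1] if hits else None
--
--
-- def parse_server_output(stdout: str, stderr: str) -> tuple[str, Optional[int]]:
--     err_seen, err_hit = _scan(stderr)
--     if err_hit is not None:
--         return err_hit
--     out_seen, out_hit = _scan(stdout)
--     if out_hit is not None:
--         return out_hit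
--     return ("unknown", None) if err_seen or out_seen else ("no-output", None)
-- ===== Notes on version B (the rewrite author's own statement) =====
-- stated objective: alternative
-- what changed: B never builds the combined line list or scans it: each stream is parsed independently by a staged pipeline (clean lines, map a classifier over them, keep the non-None hits, index the last), and the two per-stream results are combined with stderr taking priority; the status word comes from the line's first 7 characters instead of hard-coded branch literals.
import Mathlib
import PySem

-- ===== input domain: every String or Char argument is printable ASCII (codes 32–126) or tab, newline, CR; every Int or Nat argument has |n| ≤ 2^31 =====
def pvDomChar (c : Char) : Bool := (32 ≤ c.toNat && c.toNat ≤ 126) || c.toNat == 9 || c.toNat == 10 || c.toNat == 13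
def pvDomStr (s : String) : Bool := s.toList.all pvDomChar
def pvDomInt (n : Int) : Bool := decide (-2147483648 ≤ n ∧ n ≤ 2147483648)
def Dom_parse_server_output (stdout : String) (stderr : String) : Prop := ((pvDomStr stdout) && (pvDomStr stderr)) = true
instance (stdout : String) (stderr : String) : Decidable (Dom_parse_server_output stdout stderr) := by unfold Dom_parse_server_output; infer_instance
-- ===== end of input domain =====

-- B parses each stream independently with a staged map/filter/last pipeline and combines
-- the two results with stderr priority, instead of A's reverse scan over the combined
-- line list (objective: alternative decomposition, same cost).

-- ===== PORT A =====
-- A's combined `lines` list (with A's `if stdout.strip():` guards)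
def pvLinesA (stdout : String) (stderr : String) : List String :=
  (if PySem.Str.strip stdout != "" then
    ((PySem.Str.splitlines (PySem.Str.strip stdout)).filter
      (fun x => PySem.Str.strip x != "")).map PySem.Str.strip
  else []) ++
  (if PySem.Str.strip stderr != "" then
    ((PySem.Str.splitlines (PySem.Str.strip stderr)).filter
      (fun x => PySem.Str.strip x != "")).map PySem.Str.strip
  else [])

-- A's for-loop over reversed(lines), returning at the first matching line
def pvLoopA : List String → Option (String × Option Int)
  | [] => none
  | line :: rest =>
    if PySem.Str.startswith line "success " then
      some ("success", (PySem.List.pyGet? (PySem.Str.split₀ line) 1).bind PySem.Int.ofStr?)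
    else if PySem.Str.startswith line "failure " then
      some ("failure", (PySem.List.pyGet? (PySem.Str.split₀ line) 1).bind PySem.Int.ofStr?)
    else if line == "error" || line == "abort" || line == "insecure" then
      some (line, none)
    else pvLoopA rest

def parse_server_output (stdout : String) (stderr : String) : String × Option Int :=
  let lines := pvLinesA stdout stderr
  match pvLoopA lines.reverse with
  | some r => r
  | none => if lines.isEmpty then ("no-output", none) else ("unknown", none)

-- ===== PORT B =====
-- B's _clean_lines helper
def pvCleanLines (text : String) : List String :=
  ((PySem.Str.splitlines (PySem.Str.strip text)).filter
    (fun x => PySem.Str.strip x != "")).map PySem.Str.strip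

-- B's _classify helper
def pvClassify (line : String) : Option (String × Option Int) :=
  if PySem.Str.startswith line "success " || PySem.Str.startswith line "failure " then
    some (PySem.Str.slice line none (some 7),
          (PySem.List.pyGet? (PySem.Str.split₀ line) 1).bind PySem.Int.ofStr?)
  else if line == "error" || line == "abort" || line == "insecure" then
    some (line, none)
  else none

-- B's _scan helper: (had any non-empty line, last recognized status)
def pvScan (text : String) : Bool × Option (String × Option Int) :=
  let lines := pvCleanLines text
  let hits := lines.filterMap pvClassify
  (!lines.isEmpty, hits.getLast?)

def parse_server_output_alt (stdout : String) (stderr : String) : String × Option Int :=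
  let e := pvScan stderr
  match e.2 with
  | some r => r
  | none =>
    let o := pvScan stdout
    match o.2 with
    | some r => r
    | none => if e.1 || o.1 then ("unknown", none) else ("no-output", none)

-- ===== PRECONDITION & SPEC =====
def Spec_parse_server_output (stdout : String) (stderr : String) (out : String × Option Int) : Prop := out = parse_server_output_alt stdout stderr
instance (stdout : String) (stderr : String) (out : String × Option Int) : Decidable (Spec_parse_server_output stdout stderr out) := by unfold Spec_parse_server_output; infer_instance

-- ===== CLAIM =====
def Claim_equal_parse_server_output : Prop := ∀ (stdout : String) (stderr : String), Dom_parse_server_output stdout stderr → Spec_parse_server_output stdout stderr (parse_server_output stdout stderr)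

-- ===== LEMMAS AND PROOFS =====

-- a line starting with "success " / "failure " has that status word as its first 7 chars
lemma slice7_of_startswith (l : String) (w : String) (hw : w.toList.length = 7)
    (h : PySem.Str.startswith l (w ++ " ") = true) :
    PySem.Str.slice l none (some 7) = w := by
  simp only [PySem.Str.startswith_eq] at h
  obtain ⟨t, ht⟩ := (PySem.Chars.startswith_iff _ _).mp h
  have hl : l.toList = w.toList ++ (' ' :: t) := by rw [← ht]; simp
  have hs : PySem.List.slice l.toList none (some 7) = w.toList := by
    rw [PySem.List.slice_to l.toList (by norm_num), hl]
    have h7 : (7:Int).toNat = w.toList.length := by rw [hw]; rfl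
    rw [h7, List.take_left]
  simp [PySem.Str.slice, hs]

-- A's loop body on one line is exactly B's classifier, first-match style
lemma loopA_cons (l : String) (rest : List String) :
    pvLoopA (l :: rest) =
      match pvClassify l with | some hit => some hit | none => pvLoopA rest := by
  by_cases h1 : PySem.Str.startswith l "success " = true
  · rw [show pvLoopA (l :: rest) = some ("success", (PySem.List.pyGet? (PySem.Str.split₀ l) 1).bind PySem.Int.ofStr?) by
        unfold pvLoopA; rw [if_pos h1]]
    rw [show pvClassify l = some ("success", (PySem.List.pyGet? (PySem.Str.split₀ l) 1).bind PySem.Int.ofStr?) by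
        unfold pvClassify
        rw [if_pos (show (PySem.Str.startswith l "success " || PySem.Str.startswith l "failure ") = true by
              simp only [Bool.or_eq_true]; exact Or.inl h1),
          slice7_of_startswith l "success" (by decide) h1]]
  · by_cases h2 : PySem.Str.startswith l "failure " = true
    · rw [show pvLoopA (l :: rest) = some ("failure", (PySem.List.pyGet? (PySem.Str.split₀ l) 1).bind PySem.Int.ofStr?) by
          unfold pvLoopA; rw [if_neg h1, if_pos h2]]
      rw [show pvClassify l = some ("failure", (PySem.List.pyGet? (PySem.Str.split₀ l) 1).bind PySem.Int.ofStr?) by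
          unfold pvClassify
          rw [if_pos (show (PySem.Str.startswith l "success " || PySem.Str.startswith l "failure ") = true by
                simp only [Bool.or_eq_true]; exact Or.inr h2),
            slice7_of_startswith l "failure" (by decide) h2]]
    · unfold pvLoopA pvClassify
      rw [if_neg h1, if_neg h2,
        if_neg (show ¬ ((PySem.Str.startswith l "success " || PySem.Str.startswith l "failure ") = true) by
          simp only [Bool.or_eq_true]; tauto)]
      by_cases h3 : (l == "error" || l == "abort" || l == "insecure") = true
      · rw [if_pos h3, if_pos h3]
      · rw [if_neg h3, if_neg h3]; cases rest <;> rfl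

-- A's whole reversed-scan loop is findSome? of the classifier over the reversed list
lemma loopA_eq_findSome? (ls : List String) : pvLoopA ls = ls.findSome? pvClassify := by
  induction ls with
  | nil => rfl
  | cons l rest ih => rw [loopA_cons, List.findSome?_cons, ih]; cases pvClassify l <;> rfl

-- B's last hit of the filtered classifications is the first match of the reversed list
lemma getLast?_filterMap (ls : List String) :
    (ls.filterMap pvClassify).getLast? = ls.reverse.findSome? pvClassify := by
  induction ls with
  | nil => rfl
  | cons l rest ih =>
    rw [List.filterMap_cons, List.reverse_cons, List.findSome?_append]
    cases h : pvClassify l <;> simp only [h, List.findSome?_cons]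
    · rw [ih]; cases rest.reverse.findSome? pvClassify <;> simp [h]
    · rw [List.getLast?_cons, ih]
      cases hr : rest.reverse.findSome? pvClassify <;> simp [hr, h]
-- A's guard `if s.strip():` is redundant: an empty strip yields no lines anyway
lemma cleanLines_of_strip_empty (s : String) (h : PySem.Str.strip s = "") :
    pvCleanLines s = [] := by
  have he : PySem.Str.splitlines "" = [] := by decide
  unfold pvCleanLines; rw [h, he]; rfl

-- each guarded extend of A is one stream's _clean_lines
lemma guard_eq (s : String) :
    (if PySem.Str.strip s != "" then
      ((PySem.Str.splitlines (PySem.Str.strip s)).filter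
        (fun x => PySem.Str.strip x != "")).map PySem.Str.strip
    else []) = pvCleanLines s := by
  by_cases h : PySem.Str.strip s = ""
  · rw [cleanLines_of_strip_empty s h]; simp [h]
  · rw [if_pos (by simp [h])]; rfl

lemma linesA_eq (stdout stderr : String) :
    pvLinesA stdout stderr = pvCleanLines stdout ++ pvCleanLines stderr := by
  unfold pvLinesA; rw [guard_eq, guard_eq]

-- the whole equivalence, stated over the two per-stream line lists
lemma combine_eq (Lo Le : List String) :
    (match pvLoopA (Lo ++ Le).reverse with
     | some r => r
     | none => if (Lo ++ Le).isEmpty then ("no-output", none) else ("unknown", none))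
    = (match (Le.filterMap pvClassify).getLast? with
       | some r => r
       | none =>
         match (Lo.filterMap pvClassify).getLast? with
         | some r => r
         | none =>
           if !Le.isEmpty || !Lo.isEmpty then ("unknown", (none : Option Int))
           else ("no-output", none)) := by
  rw [loopA_eq_findSome?, List.reverse_append, List.findSome?_append,
    getLast?_filterMap, getLast?_filterMap]
  cases he : Le.reverse.findSome? pvClassify <;>
    cases ho : Lo.reverse.findSome? pvClassify <;>
      by_cases hLo : Lo = [] <;> by_cases hLe : Le = [] <;>
        simp [Option.or, hLo, hLe]

-- evaluation lemmas for B's port (kept as rewriting steps: pvScan's result as a pair literal)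
lemma pvScan_eq (text : String) : pvScan text =
    (!(pvCleanLines text).isEmpty, ((pvCleanLines text).filterMap pvClassify).getLast?) := by
  simp only [pvScan]

lemma alt_eq (stdout stderr : String) : parse_server_output_alt stdout stderr =
    (match ((pvCleanLines stderr).filterMap pvClassify).getLast? with
     | some r => r
     | none =>
       match ((pvCleanLines stdout).filterMap pvClassify).getLast? with
       | some r => r
       | none =>
         if !(pvCleanLines stderr).isEmpty || !(pvCleanLines stdout).isEmpty then
           ("unknown", (none : Option Int))
         else ("no-output", none)) := by
  simp only [parse_server_output_alt, pvScan_eq]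

-- ===== VERDICT (by name: the statement is the Claim_ definition above) =====
theorem parse_server_output_spec : Claim_equal_parse_server_output := by
  intro stdout stderr _
  unfold Spec_parse_server_output
  rw [alt_eq]
  have h := combine_eq (pvCleanLines stdout) (pvCleanLines stderr)
  rw [← linesA_eq] at h
  exact h
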